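-- pv_equiv track=rewrite | github.com/jojoGabriel/gospel-harmony | scripts/reference_coverage_audit.py | covered_ranges
-- ===== SOURCE A (Python) =====
-- CHAPTER_VERSE_COUNTS = {
--     "Matthew": [25, 23, 17, 25, 48, 34, 29, 34, 38, 42, 30, 50, 58, 36, 39, 28, 27, 35, 30, 34, 46, 46, 39, 51, 46, 75, 66, 20],
--     "Mark": [45, 28, 35, 41, 43, 56, 37, 38, 50, 52, 33, 44, 37, 72, 47, 20],
--     "Luke": [80, 52, 38, 44, 39, 49, 50, 56, 62, 42, 54, 59, 35, 35, 32, 31, 37, 43, 48, 47, 38, 71, 56, 53],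
--     "John": [51, 25, 36, 54, 47, 71, 53, 59, 41, 42, 57, 50, 38, 31, 27, 33, 26, 40, 42, 31, 25],
-- }
--
-- def format_range(chapter: int, start_verse: int, end_verse: int) -> str:
--     if start_verse == end_verse:
--         return f"{chapter}:{start_verse}"
--     return f"{chapter}:{start_verse}-{end_verse}"
--
-- def covered_ranges(gospel: str, coverage: dict[int, set[int]]) -> list[str]:
--     results: list[str] = []
--     for chapter, last_verse in enumerate(CHAPTER_VERSE_COUNTS[gospel], start=1):
--         present = coverage.get(chapter, set())
--         if not present:
--             continue
--         start = None
--         for verse in range(1, last_verse + 1):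
--             if verse in present and start is None:
--                 start = verse
--             elif verse not in present and start is not None:
--                 results.append(format_range(chapter, start, verse - 1))
--                 start = None
--         if start is not None:
--             results.append(format_range(chapter, start, last_verse))
--     return results
-- ===== SOURCE B (Python) =====
-- CHAPTER_VERSE_COUNTS = {
--     "Matthew": [25, 23, 17, 25, 48, 34, 29, 34, 38, 42, 30, 50, 58, 36, 39, 28, 27, 35, 30, 34, 46, 46, 39, 51, 46, 75, 66, 20],
--     "Mark": [45, 28, 35, 41, 43, 56, 37, 38, 50, 52, 33, 44, 37, 72, 47, 20],
--     "Luke": [80, 52, 38, 44, 39, 49, 50, 56, 62, 42, 54, 59, 35, 35, 32, 31, 37, 43, 48, 47, 38, 71, 56, 53],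
--     "John": [51, 25, 36, 54, 47, 71, 53, 59, 41, 42, 57, 50, 38, 31, 27, 33, 26, 40, 42, 31, 25],
-- }
--
-- def format_range(chapter: int, start_verse: int, end_verse: int) -> str:
--     if start_verse == end_verse:
--         return f"{chapter}:{start_verse}"
--     return f"{chapter}:{start_verse}-{end_verse}"
--
-- def covered_ranges(gospel: str, coverage: dict[int, set[int]]) -> list[str]:
--     results: list[str] = []
--     for chapter, last_verse in enumerate(CHAPTER_VERSE_COUNTS[gospel], start=1):
--         present = coverage.get(chapter, set())
--         vs = sorted(v for v in present if 1 <= v <= last_verse)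
--         if not vs:
--             continue
--         run_start = run_end = vs[0]
--         for v in vs[1:]:
--             if v == run_end + 1:
--                 run_end = v
--             else:
--                 results.append(format_range(chapter, run_start, run_end))
--                 run_start = run_end = v
--         results.append(format_range(chapter, run_start, run_end))
--     return results
-- ===== Notes on version B (the rewrite author's own statement) =====
-- stated objective: idiomatic
-- what changed: Per chapter, instead of scanning every verse 1..last_verse with a start sentinel, B sorts the in-range covered verses and groups maximal consecutive runs in one pass over only the covered verses.
import Mathlib
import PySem

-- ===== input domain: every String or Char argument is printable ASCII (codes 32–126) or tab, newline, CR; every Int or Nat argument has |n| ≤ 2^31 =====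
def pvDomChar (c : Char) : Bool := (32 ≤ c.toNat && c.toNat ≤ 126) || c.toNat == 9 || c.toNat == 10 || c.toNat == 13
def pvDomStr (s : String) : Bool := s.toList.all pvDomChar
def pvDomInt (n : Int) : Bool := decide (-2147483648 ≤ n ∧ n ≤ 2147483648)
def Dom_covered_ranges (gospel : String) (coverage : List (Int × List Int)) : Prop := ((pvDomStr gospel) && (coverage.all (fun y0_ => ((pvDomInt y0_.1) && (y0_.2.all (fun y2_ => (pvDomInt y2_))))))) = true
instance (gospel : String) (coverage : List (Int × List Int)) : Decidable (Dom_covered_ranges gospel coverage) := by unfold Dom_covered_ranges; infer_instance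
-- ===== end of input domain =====

-- B replaces A's dense scan of every verse 1..last_verse (start sentinel) by sorting the
-- in-range covered verses of each chapter and grouping maximal consecutive runs in one pass
-- over only the covered verses (objective: more idiomatic; same return value).

-- shared module context: CHAPTER_VERSE_COUNTS[gospel] (none = KeyError) and format_range
def verseCounts (gospel : String) : Option (List Int) :=
  if gospel = "Matthew" then some [25, 23, 17, 25, 48, 34, 29, 34, 38, 42, 30, 50, 58, 36, 39, 28, 27, 35, 30, 34, 46, 46, 39, 51, 46, 75, 66, 20]
  else if gospel = "Mark" then some [45, 28, 35, 41, 43, 56, 37, 38, 50, 52, 33, 44, 37, 72, 47, 20]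
  else if gospel = "Luke" then some [80, 52, 38, 44, 39, 49, 50, 56, 62, 42, 54, 59, 35, 35, 32, 31, 37, 43, 48, 47, 38, 71, 56, 53]
  else if gospel = "John" then some [51, 25, 36, 54, 47, 71, 53, 59, 41, 42, 57, 50, 38, 31, 27, 33, 26, 40, 42, 31, 25]
  else none

def fmtRange (chapter start_verse end_verse : Int) : String :=
  if start_verse = end_verse then PySem.Int.toStr chapter ++ ":" ++ PySem.Int.toStr start_verse
  else PySem.Int.toStr chapter ++ ":" ++ PySem.Int.toStr start_verse ++ "-" ++ PySem.Int.toStr end_verse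

-- coverage.get(chapter, set()): first-match association-list lookup, default empty set
def covGetD (coverage : List (Int × List Int)) (k : Int) : List Int :=
  match coverage with
  | [] => []
  | (k', v) :: rest => if k' = k then v else covGetD rest k

-- ===== PORT A =====
-- body of A's inner 'for verse in range(1, last_verse+1)' loop; state (start, results)
def stepA (present : List Int) (chapter : Int) (st : Option Int × List String) (verse : Int) :
    Option Int × List String :=
  match st with
  | (none, res) => if present.contains verse then (some verse, res) else (none, res)
  | (some s, res) =>
      if present.contains verse then (some s, res)
      else (none, res ++ [fmtRange chapter s (verse - 1)])

-- body of A's outer 'for chapter, last_verse in enumerate(..., start=1)' loop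
def chapterA (coverage : List (Int × List Int)) (results : List String) (p : Int × Int) :
    List String :=
  if covGetD coverage p.1 = [] then results
  else
    match (PySem.List.pyRange 1 (p.2 + 1) 1).foldl (stepA (covGetD coverage p.1) p.1)
        (none, results) with
    | (some s, res) => res ++ [fmtRange p.1 s p.2]
    | (none, res) => res

def covered_ranges (gospel : String) (coverage : List (Int × List Int)) : List String :=
  match verseCounts gospel with
  | none => []   -- unreachable under Pre_ (Python raises KeyError)
  | some counts => (PySem.List.enumerate counts 1).foldl (chapterA coverage) []

-- ===== PORT B =====
-- body of B's inner 'for v in vs[1:]' run-grouping loop; state (run_start, run_end, results)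
def stepB (chapter : Int) (st : Int × Int × List String) (v : Int) : Int × Int × List String :=
  if v = st.2.1 + 1 then (st.1, v, st.2.2)
  else (v, v, st.2.2 ++ [fmtRange chapter st.1 st.2.1])

-- body of B's outer loop: sort the in-range covered verses, group consecutive runs
def chapterB (coverage : List (Int × List Int)) (results : List String) (p : Int × Int) :
    List String :=
  match PySem.List.sorted ((covGetD coverage p.1).filter
      (fun v => decide (1 ≤ v ∧ v ≤ p.2))) (fun x => x) false with
  | [] => results
  | v0 :: rest =>
      match rest.foldl (stepB p.1) (v0, v0, results) with
      | (rs, re, res) => res ++ [fmtRange p.1 rs re]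

def covered_ranges_alt (gospel : String) (coverage : List (Int × List Int)) : List String :=
  match verseCounts gospel with
  | none => []
  | some counts => (PySem.List.enumerate counts 1).foldl (chapterB coverage) []

-- ===== PRECONDITION & SPEC =====
-- Pre_ excludes (i) gospels that are not keys of CHAPTER_VERSE_COUNTS, on which the Python A
-- raises KeyError, and (ii) coverage values with duplicate elements, which do not encode a
-- Python set (the dict values are set[int]: their list encoding holds distinct elements).
def Pre_covered_ranges (gospel : String) (coverage : List (Int × List Int)) : Prop :=
  (gospel = "Matthew" ∨ gospel = "Mark" ∨ gospel = "Luke" ∨ gospel = "John") ∧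
  ∀ p ∈ coverage, p.2.Nodup
instance (gospel : String) (coverage : List (Int × List Int)) : Decidable (Pre_covered_ranges gospel coverage) := by unfold Pre_covered_ranges; infer_instance

def pvWitness_covered_ranges : String × (List (Int × List Int)) :=
  ("Mark", [(1, [2, 3, 5]), (3, [1])])

def Spec_covered_ranges (gospel : String) (coverage : List (Int × List Int)) (out : List String) : Prop := out = covered_ranges_alt gospel coverage
instance (gospel : String) (coverage : List (Int × List Int)) (out : List String) : Decidable (Spec_covered_ranges gospel coverage out) := by unfold Spec_covered_ranges; infer_instance

-- ===== CLAIM (what is proved, stated in full; the proofs are below) =====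
def Claim_equal_covered_ranges : Prop := ∀ (gospel : String) (coverage : List (Int × List Int)), Dom_covered_ranges gospel coverage → Pre_covered_ranges gospel coverage → Spec_covered_ranges gospel coverage (covered_ranges gospel coverage)

-- ===== LEMMAS AND PROOFS =====

-- B's fold with an Option state (none = no run open yet): proof-side reformulation
def gB (chapter : Int) (st : Option (Int × Int) × List String) (v : Int) :
    Option (Int × Int) × List String :=
  match st with
  | (none, res) => (some (v, v), res)
  | (some (rs, re), res) =>
      if v = re + 1 then (some (rs, v), res)
      else (some (v, v), res ++ [fmtRange chapter rs re])

def finB (chapter : Int) (st : Option (Int × Int) × List String) : List String :=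
  match st with
  | (none, res) => res
  | (some (rs, re), res) => res ++ [fmtRange chapter rs re]

def finA (chapter n : Int) (st : Option Int × List String) : List String :=
  match st with
  | (none, res) => res
  | (some s, res) => res ++ [fmtRange chapter s n]

-- invariant relating A's scan state after verses 1..m to B's run state after the covered
-- verses ≤ m
def RelAB (chapter m : Int) (a : Option Int × List String)
    (b : Option (Int × Int) × List String) : Prop :=
  match a.1, b.1 with
  | some s, _ => b.1 = some (s, m) ∧ a.2 = b.2
  | none, none => a.2 = b.2
  | none, some (rs, re) => re + 1 ≤ m ∧ a.2 = b.2 ++ [fmtRange chapter rs re]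

lemma foldl_gB_some (chapter : Int) (rest : List Int) :
    ∀ (rs re : Int) (acc : List String),
      rest.foldl (gB chapter) (some (rs, re), acc) =
        (some ((rest.foldl (stepB chapter) (rs, re, acc)).1,
               (rest.foldl (stepB chapter) (rs, re, acc)).2.1),
         (rest.foldl (stepB chapter) (rs, re, acc)).2.2) := by
  induction rest with
  | nil => intro rs re acc; rfl
  | cons v rest ih =>
      intro rs re acc
      simp only [List.foldl_cons, gB, stepB]
      by_cases h : v = re + 1 <;> simp only [h, if_pos, if_false] <;> exact ih _ _ _

lemma chapterB_eq_finB (coverage : List (Int × List Int)) (acc : List String) (p : Int × Int) :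
    chapterB coverage acc p =
      finB p.1 ((PySem.List.sorted ((covGetD coverage p.1).filter
        (fun v => decide (1 ≤ v ∧ v ≤ p.2))) (fun x => x) false).foldl (gB p.1) (none, acc)) := by
  unfold chapterB
  cases hvs : PySem.List.sorted ((covGetD coverage p.1).filter
      (fun v => decide (1 ≤ v ∧ v ≤ p.2))) (fun x => x) false with
  | nil => rfl
  | cons v0 rest =>
      simp only [List.foldl_cons]
      have h0 : gB p.1 (none, acc) v0 = (some (v0, v0), acc) := rfl
      rw [h0, foldl_gB_some]
      rcases hfold : rest.foldl (stepB p.1) (v0, v0, acc) with ⟨rs, re, res⟩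
      simp [finB]

-- the sorted in-range covered verses are exactly the covered elements of range(1, n+1)
lemma sorted_filter_eq_range_filter (present : List Int) (n : Int)
    (hnd : present.Nodup) :
    PySem.List.sorted (present.filter (fun v => decide (1 ≤ v ∧ v ≤ n))) (fun x => x) false =
      (PySem.List.pyRange 1 (n + 1) 1).filter (fun v => present.contains v) := by
  apply PySem.List.sorted_eq_of_perm_of_pairwise_lt
  · apply List.perm_of_nodup_nodup_toFinset_eq
    · exact (PySem.List.nodup_pyRange_one 1 (n + 1)).filter _
    · exact hnd.filter _
    · ext x
      simp only [List.mem_toFinset, List.mem_filter, PySem.List.mem_pyRange_one,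
        decide_eq_true_eq, List.contains_iff_mem]
      constructor
      · rintro ⟨⟨h1, h2⟩, h3⟩; exact ⟨h3, h1, by omega⟩
      · rintro ⟨h3, h1, h2⟩; exact ⟨⟨h1, by omega⟩, h3⟩
  · exact (PySem.List.pairwise_lt_pyRange_one 1 (n + 1)).filter _

lemma rel_invariant (chapter : Int) (present : List Int) (acc : List String) :
    ∀ m : Int, 0 ≤ m →
      RelAB chapter m
        ((PySem.List.pyRange 1 (m + 1) 1).foldl (stepA present chapter) (none, acc))
        (((PySem.List.pyRange 1 (m + 1) 1).filter
            (fun v => present.contains v)).foldl (gB chapter) (none, acc)) := by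
  intro m hm
  induction m, hm using Int.le_induction with
  | base =>
      rw [PySem.List.pyRange_one_eq_nil (by norm_num)]
      simp [RelAB]
  | succ n hn ih =>
      rw [PySem.List.pyRange_one_succ_right (a := 1) (b := n + 1) (by omega),
        List.foldl_append, List.filter_append, List.foldl_append]
      rcases hA : (PySem.List.pyRange 1 (n + 1) 1).foldl (stepA present chapter)
          (none, acc) with ⟨osa, ra⟩
      rcases hB : ((PySem.List.pyRange 1 (n + 1) 1).filter
          (fun v => present.contains v)).foldl (gB chapter) (none, acc) with ⟨osb, rb⟩
      rw [hA, hB] at ih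
      by_cases hc : present.contains (n + 1)
      · -- verse n+1 covered
        simp only [List.filter_cons, List.filter_nil, hc, if_pos, List.foldl_cons,
          List.foldl_nil, stepA, gB]
        cases osa with
        | some s =>
            obtain ⟨hosb, hres⟩ := ih
            subst hosb
            have h2 : ra = rb := hres
            simp [h2]
            exact ⟨rfl, rfl⟩
        | none =>
            cases osb with
            | none =>
                exact ⟨rfl, ih⟩
            | some rsre =>
                rcases rsre with ⟨rs, re⟩
                obtain ⟨hre, hres⟩ := ih
                have hne : ¬ ((n + 1 : Int) = re + 1) := by omega
                simp only [if_neg hne]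
                exact ⟨rfl, hres⟩
      · -- verse n+1 not covered
        simp only [List.filter_cons, List.filter_nil, hc, Bool.false_eq_true, if_false,
          List.foldl_cons, List.foldl_nil, stepA]
        cases osa with
        | some s =>
            obtain ⟨hosb, hres⟩ := ih
            subst hosb
            have harg : (n + 1 : Int) - 1 = n := by ring
            rw [harg]
            have h2 : ra = rb := hres
            exact ⟨by omega, by show ra ++ _ = rb ++ _; rw [h2]⟩
        | none =>
            cases osb with
            | none =>
                exact ih
            | some rsre =>
                rcases rsre with ⟨rs, re⟩
                obtain ⟨hre, hres⟩ := ih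
                exact ⟨by omega, hres⟩

lemma rel_final (chapter n : Int) (a : Option Int × List String)
    (b : Option (Int × Int) × List String) (h : RelAB chapter n a b) :
    finA chapter n a = finB chapter b := by
  rcases a with ⟨osa, ra⟩; rcases b with ⟨osb, rb⟩
  cases osa with
  | some s =>
      obtain ⟨hosb, hres⟩ := h
      have h2 : ra = rb := hres
      simp only at hosb
      subst hosb
      simp [finA, finB, h2]
  | none =>
      cases osb with
      | none => simpa [finA, finB] using h
      | some rsre =>
          rcases rsre with ⟨rs, re⟩
          obtain ⟨_, hres⟩ := h
          have h2 : ra = rb ++ [fmtRange chapter rs re] := hres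
          simp [finA, finB, h2]

lemma chapterA_eq_chapterB (coverage : List (Int × List Int)) (acc : List String)
    (p : Int × Int) (hnd : (covGetD coverage p.1).Nodup) (hn : 0 ≤ p.2) :
    chapterA coverage acc p = chapterB coverage acc p := by
  rw [chapterB_eq_finB, sorted_filter_eq_range_filter _ _ hnd]
  have hfin := rel_final p.1 p.2 _ _
    (rel_invariant p.1 (covGetD coverage p.1) acc p.2 hn)
  unfold chapterA
  by_cases hemp : covGetD coverage p.1 = []
  · -- empty set: A skips the chapter; B's filtered range is empty, so finB is the identity
    rw [if_pos hemp, hemp]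
    have hnilf : ((PySem.List.pyRange 1 (p.2 + 1) 1).filter
        (fun v => ([] : List Int).contains v)) = [] := by simp
    rw [hnilf]
    rfl
  · rw [if_neg hemp, ← hfin]
    rcases hAf : (PySem.List.pyRange 1 (p.2 + 1) 1).foldl
        (stepA (covGetD coverage p.1) p.1) (none, acc) with ⟨osa, ra⟩
    cases osa <;> simp [finA]

lemma covGetD_nodup (coverage : List (Int × List Int)) (k : Int)
    (h : ∀ p ∈ coverage, p.2.Nodup) : (covGetD coverage k).Nodup := by
  induction coverage with
  | nil => simp [covGetD]
  | cons q rest ih =>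
      rcases q with ⟨k', v⟩
      simp only [covGetD]
      by_cases hk : k' = k
      · rw [if_pos hk]
        exact h (k', v) (by simp)
      · rw [if_neg hk]
        exact ih (fun p hp => h p (List.mem_cons_of_mem _ hp))

lemma foldl_chapter_eq (coverage : List (Int × List Int)) (counts : List Int)
    (hnd : ∀ p ∈ coverage, p.2.Nodup)
    (hpos : ∀ q ∈ PySem.List.enumerate counts 1, 0 ≤ q.2) :
    (PySem.List.enumerate counts 1).foldl (chapterA coverage) [] =
      (PySem.List.enumerate counts 1).foldl (chapterB coverage) [] := by
  apply PySem.List.foldl_congr_mem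
  intro acc q hq
  exact chapterA_eq_chapterB coverage acc q (covGetD_nodup coverage q.1 hnd) (hpos q hq)

-- ===== VERDICT (by name: the statement is the Claim_ definition above) =====
theorem covered_ranges_spec : Claim_equal_covered_ranges := by
  intro gospel coverage _ hpre
  unfold Spec_covered_ranges covered_ranges covered_ranges_alt
  cases hv : verseCounts gospel with
  | none => rfl
  | some counts =>
      apply foldl_chapter_eq coverage counts hpre.2
      unfold verseCounts at hv
      split_ifs at hv <;> (cases hv; decide)
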